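-- pv_equiv track=rewrite | github.com/Taamne/PTIT | Python - PTIT/code/PY04012.py | to_point
-- ===== SOURCE A (Python) =====
-- def to_point(s):
--     point=10
--     for i in s:
--         if i == 'v':
--             point -=2
--         elif i =='m':
--             point-=1
--     return point
-- ===== SOURCE B (Python) =====
-- def to_point(s):
--     if len(s) >= 2:
--         mid = len(s) // 2
--         return to_point(s[:mid]) + to_point(s[mid:]) - 10
--     if s == 'v':
--         return 8
--     if s == 'm':
--         return 9
--     return 10
-- ===== Notes on version B (the rewrite author's own statement) =====
-- stated objective: alternative
-- what changed: Replaces the accumulating left-to-right loop with divide-and-conquer recursion: the score is 10 minus an additive penalty, so score(x+y) = score(x) + score(y) - 10, with base cases for strings of length at most 1.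
import Mathlib
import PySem

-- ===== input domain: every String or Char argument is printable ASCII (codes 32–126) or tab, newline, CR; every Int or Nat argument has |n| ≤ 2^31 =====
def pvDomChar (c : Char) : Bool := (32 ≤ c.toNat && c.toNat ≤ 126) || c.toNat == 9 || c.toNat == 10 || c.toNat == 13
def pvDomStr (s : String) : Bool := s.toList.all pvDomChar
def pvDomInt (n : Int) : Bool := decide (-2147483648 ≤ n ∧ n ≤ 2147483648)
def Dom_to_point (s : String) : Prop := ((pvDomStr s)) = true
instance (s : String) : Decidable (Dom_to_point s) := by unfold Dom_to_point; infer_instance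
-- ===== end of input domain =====

-- B replaces A's accumulating loop by divide-and-conquer: score(x+y) = score(x) + score(y) - 10 (alternative decomposition, same cost).

-- ===== PORT A =====
def to_point (s : String) : Int :=
  s.toList.foldl (fun point i =>
    if i = 'v' then point - 2
    else if i = 'm' then point - 1
    else point) 10

-- ===== PORT B =====
-- divide-and-conquer over the character list (s[:mid] = take, s[mid:] = drop for these nonnegative
-- indices); the Nat fuel, called with fuel = length, only makes the halving recursion structural
def toPointDC : Nat → List Char → Int
  | 0, _ => 10
  | fuel + 1, l =>
    if 2 ≤ l.length then
      toPointDC fuel (l.take (l.length / 2)) + toPointDC fuel (l.drop (l.length / 2)) - 10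
    else if l = ['v'] then 8
    else if l = ['m'] then 9
    else 10

def to_point_alt (s : String) : Int := toPointDC s.toList.length s.toList

-- ===== PRECONDITION & SPEC =====
def Spec_to_point (s : String) (out : Int) : Prop := out = to_point_alt s
instance (s : String) (out : Int) : Decidable (Spec_to_point s out) := by unfold Spec_to_point; infer_instance

-- ===== CLAIM (what is proved, stated in full; the proofs are below) =====
def Claim_equal_to_point : Prop := ∀ (s : String), Dom_to_point s → Spec_to_point s (to_point s)

-- ===== LEMMAS AND PROOFS =====

lemma foldl_point (l : List Char) (a : Int) :
    l.foldl (fun point i =>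
      if i = 'v' then point - 2
      else if i = 'm' then point - 1
      else point) a = a - 2 * (l.count 'v' : Int) - (l.count 'm' : Int) := by
  induction l generalizing a with
  | nil => simp
  | cons x xs ih =>
    simp only [List.foldl_cons, ih, List.count_cons]
    by_cases hv : x = 'v'
    · simp [hv]; ring
    · by_cases hm : x = 'm'
      · simp [hm]; ring
      · simp [hv, hm]

lemma toPointDC_closed (fuel : Nat) : ∀ (l : List Char), l.length ≤ fuel →
    toPointDC fuel l = 10 - 2 * (l.count 'v' : Int) - (l.count 'm' : Int) := by
  induction fuel with
  | zero =>
    intro l hl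
    have hnil : l = [] := List.eq_nil_of_length_eq_zero (Nat.le_zero.mp hl)
    subst hnil
    simp [toPointDC]
  | succ n ih =>
    intro l hl
    rw [toPointDC]
    by_cases h : 2 ≤ l.length
    · rw [if_pos h]
      have h1 : (l.take (l.length / 2)).length ≤ n := by
        simp only [List.length_take]; omega
      have h2 : (l.drop (l.length / 2)).length ≤ n := by
        simp only [List.length_drop]; omega
      rw [ih _ h1, ih _ h2]
      have hv : l.count 'v'
          = (l.take (l.length / 2)).count 'v' + (l.drop (l.length / 2)).count 'v' := by
        rw [← List.count_append, List.take_append_drop]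
      have hm : l.count 'm'
          = (l.take (l.length / 2)).count 'm' + (l.drop (l.length / 2)).count 'm' := by
        rw [← List.count_append, List.take_append_drop]
      rw [hv, hm]; push_cast; ring
    · rw [if_neg h]
      match l, h with
      | [], _ => simp
      | [c], _ =>
        by_cases hcv : c = 'v'
        · simp [hcv]
        · by_cases hcm : c = 'm'
          · simp [hcm]
          · simp [hcv, hcm]
      | (a :: b :: t), h =>
        exact absurd (by simp only [List.length_cons]; omega) h

-- ===== VERDICT (by name: the statement is the Claim_ definition above) =====
theorem to_point_spec : Claim_equal_to_point := by
  intro s _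
  unfold Spec_to_point to_point to_point_alt
  rw [foldl_point, toPointDC_closed _ _ le_rfl]
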